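-- pv_equiv track=rewrite | github.com/Yawn-Sean/Daily_CF_Problems | daily_problems/2025/08/0827/personal_submission/cf1948d_liryc.py | solve
-- ===== SOURCE A (Python) =====
-- def solve(s: str) -> int:
--     n = len(s)
--     dp = [[0] * n for _ in range(n)]
--     ans = 0
--     for i in range(n):
--         for j in range(i + 1, n):
--             if s[i] == '?' or s[j] == '?' or s[i] == s[j]:
--                 dp[i][j] = 1
--                 if i:
--                     dp[i][j] += dp[i - 1][j - 1]
--                 if dp[i][j] >= j - i:
--                     ans = max(ans, j - i << 1)
--     return ans
-- ===== SOURCE B (Python) =====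
-- def solve(s: str) -> int:
--     n = len(s)
--     ans = 0
--     for d in range(1, n):
--         run = 0
--         for i in range(n - d):
--             j = i + d
--             if s[i] == '?' or s[j] == '?' or s[i] == s[j]:
--                 run += 1
--             else:
--                 run = 0
--             if run >= d:
--                 ans = max(ans, 2 * d)
--     return ans
-- ===== Notes on version B (the rewrite author's own statement) =====
-- stated objective: simpler
-- what changed: Replaced A's O(n^2)-memory 2D dp table traversed row-by-row with a per-diagonal sweep (outer loop over the gap d, inner slide along the diagonal) maintaining a single scalar run counter in O(1) extra memory; a timing run also measured B ~1.8-2x faster (no list-of-lists allocation/indexing).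
import Mathlib
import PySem

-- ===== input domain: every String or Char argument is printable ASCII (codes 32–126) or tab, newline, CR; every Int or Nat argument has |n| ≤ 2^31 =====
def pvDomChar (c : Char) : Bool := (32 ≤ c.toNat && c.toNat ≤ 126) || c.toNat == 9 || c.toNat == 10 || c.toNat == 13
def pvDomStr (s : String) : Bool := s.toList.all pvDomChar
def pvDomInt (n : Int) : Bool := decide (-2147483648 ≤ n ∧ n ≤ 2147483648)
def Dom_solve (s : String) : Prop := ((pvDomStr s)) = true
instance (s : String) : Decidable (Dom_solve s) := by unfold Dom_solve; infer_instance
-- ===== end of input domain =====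

-- B replaces A's O(n^2)-memory 2D dp table by a per-diagonal sweep with a single scalar run counter (objective: simpler, O(1) extra memory).

-- ===== PORT A =====
-- shared helper: the character-compatibility test 's[i]=='?' or s[j]=='?' or s[i]==s[j]' (identical line in both Pythons)
def pvMatch (cs : List Char) (i j : Nat) : Bool :=
  cs.getD i ' ' == '?' || cs.getD j ' ' == '?' || cs.getD i ' ' == cs.getD j ' '

-- body of A's inner loop over j (state = (dp, ans)); dp[i][j]=1 (+ dp[i-1][j-1] if i) becomes the single write of v
def stepA (cs : List Char) (i : Nat) (st : List (List Int) × Int) (j : Nat) : List (List Int) × Int :=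
  if pvMatch cs i j then
    let v : Int := if i ≠ 0 then 1 + ((st.1.getD (i - 1) []).getD (j - 1) 0) else 1
    (st.1.set i ((st.1.getD i []).set j v),
     if v ≥ ((j : Int) - (i : Int)) then max st.2 (((j : Int) - (i : Int)) * 2) else st.2)
  else st

def solve (s : String) : Int :=
  let cs := s.toList
  let n := cs.length
  let dp0 : List (List Int) := List.replicate n (List.replicate n 0)
  ((List.range n).foldl (fun st i => (List.range' (i + 1) (n - (i + 1))).foldl (stepA cs i) st) (dp0, 0)).2

-- ===== PORT B =====
-- body of B's inner loop over i along the diagonal of gap d (state = (run, ans))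
def stepB (cs : List Char) (d : Nat) (st : Nat × Int) (i : Nat) : Nat × Int :=
  let j := i + d
  let run' := if pvMatch cs i j then st.1 + 1 else 0
  (run', if run' ≥ d then max st.2 (2 * (d : Int)) else st.2)

def solve_alt (s : String) : Int :=
  let cs := s.toList
  let n := cs.length
  (List.range' 1 (n - 1)).foldl (fun ans d => ((List.range (n - d)).foldl (stepB cs d) (0, ans)).2) 0

-- ===== PRECONDITION & SPEC =====
def Spec_solve (s : String) (out : Int) : Prop := out = solve_alt s
instance (s : String) (out : Int) : Decidable (Spec_solve s out) := by unfold Spec_solve; infer_instance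

-- ===== CLAIM (what is proved, stated in full; the proofs are below) =====
def Claim_equal_solve : Prop := ∀ (s : String), Dom_solve s → Spec_solve s (solve s)

-- ===== LEMMAS AND PROOFS =====

-- run length ending at position i along the diagonal of gap d
def runR (cs : List Char) : Nat → Nat → Nat
  | 0, d => if pvMatch cs 0 d then 1 else 0
  | i + 1, d => if pvMatch cs (i + 1) (i + 1 + d) then runR cs i d + 1 else 0

-- the common answer-update step, on pairs (d, i)
def gMax (cs : List Char) (acc : Int) (p : Nat × Nat) : Int :=
  if p.1 ≤ runR cs p.2 p.1 then max acc (2 * (p.1 : Int)) else acc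

def rowPairs (n : Nat) : List (Nat × Nat) :=
  (List.range n).flatMap (fun i => (List.range' (i + 1) (n - (i + 1))).map (fun j => (j - i, i)))

def diagPairs (n : Nat) : List (Nat × Nat) :=
  (List.range' 1 (n - 1)).flatMap (fun d => (List.range (n - d)).map (fun i => (d, i)))

-- dp-table invariant for A: rows before i (and row i before column j) hold the run values, rest is 0
def InvA (cs : List Char) (n i j : Nat) (dp : List (List Int)) : Prop :=
  dp.length = n ∧ (∀ row ∈ dp, row.length = n) ∧
  ∀ a b : Nat, (dp.getD a []).getD b 0 =
    if a < b ∧ b < n ∧ (a < i ∨ (a = i ∧ b < j)) then (runR cs a (b - a) : Int) else 0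

theorem runR_zero (cs : List Char) (i d : Nat) (h : pvMatch cs i (i + d) = false) :
    runR cs i d = 0 := by
  cases i <;> simp_all [runR]

theorem getD_set_outer (l : List (List Int)) (i a : Nat) (r : List Int) (hi : i < l.length) :
    (l.set i r).getD a [] = if a = i then r else l.getD a [] := by
  by_cases h : a = i
  · subst h
    rw [if_pos rfl, List.getD_eq_getElem?_getD, List.getElem?_set, if_pos rfl, if_pos hi]
    rfl
  · rw [if_neg h, List.getD_eq_getElem?_getD, List.getD_eq_getElem?_getD, List.getElem?_set,
      if_neg (fun hh => h hh.symm)]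

theorem getD_set_inner (l : List Int) (k b : Nat) (v : Int) (hk : k < l.length) :
    (l.set k v).getD b 0 = if b = k then v else l.getD b 0 := by
  by_cases h : b = k
  · subst h
    rw [if_pos rfl, List.getD_eq_getElem?_getD, List.getElem?_set, if_pos rfl, if_pos hk]
    rfl
  · rw [if_neg h, List.getD_eq_getElem?_getD, List.getD_eq_getElem?_getD, List.getElem?_set,
      if_neg (fun hh => h hh.symm)]

theorem innerA_spec (cs : List Char) (i : Nat) (hi : i < cs.length) :
    ∀ (t k : Nat) (dp : List (List Int)) (ans : Int), i < k → t = cs.length - k →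
    InvA cs cs.length i k dp →
    InvA cs cs.length i cs.length ((List.range' k t).foldl (stepA cs i) (dp, ans)).1 ∧
    ((List.range' k t).foldl (stepA cs i) (dp, ans)).2 =
      List.foldl (gMax cs) ans ((List.range' k t).map (fun j => (j - i, i))) := by
  intro t
  induction t with
  | zero =>
    intro k dp ans hik ht hinv
    obtain ⟨h1, h2, h3⟩ := hinv
    simp only [List.range'_zero, List.foldl_nil, List.map_nil]
    refine ⟨⟨h1, h2, fun a b => ?_⟩, trivial⟩
    rw [h3 a b]
    exact if_congr (by omega) rfl rfl
  | succ t ih =>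
    intro k dp ans hik ht hinv
    obtain ⟨h1, h2, h3⟩ := hinv
    have hkn : k < cs.length := by omega
    rw [List.range'_succ]
    simp only [List.foldl_cons, List.map_cons]
    by_cases hm : pvMatch cs i k = true
    · -- match: the cell (i,k) is written with runR cs i (k-i)
      have hrlen : (dp.getD i []).length = cs.length := by
        rw [List.getD_eq_getElem?_getD, List.getElem?_eq_getElem (h1 ▸ hi)]
        exact h2 _ (List.getElem_mem _)
      have hv : (if i ≠ 0 then 1 + ((dp.getD (i - 1) []).getD (k - 1) 0) else (1 : Int))
          = (runR cs i (k - i) : Int) := by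
        cases i with
        | zero =>
          have hd : k - 0 = k := by omega
          simp only [ne_eq, not_true_eq_false, runR, hd]
          simp [hm]
        | succ i' =>
          have hlook := h3 i' (k - 1)
          rw [if_pos ⟨by omega, by omega, Or.inl (by omega)⟩] at hlook
          have e1 : i' + 1 - 1 = i' := by omega
          have e2 : k - 1 - i' = k - (i' + 1) := by omega
          have e3 : i' + 1 + (k - (i' + 1)) = k := by omega
          simp only [ne_eq, Nat.succ_ne_zero, not_false_eq_true, if_pos, e1]
          rw [hlook, e2]
          have : runR cs (i' + 1) (k - (i' + 1)) = runR cs i' (k - (i' + 1)) + 1 := by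
            show (if pvMatch cs (i' + 1) (i' + 1 + (k - (i' + 1))) then _ + 1 else 0) = _
            rw [e3, if_pos hm]
          rw [this]
          push_cast
          ring
      have hcast : (k : Int) - (i : Int) = ((k - i : Nat) : Int) := by
        rw [Nat.cast_sub hik.le]
      have hstep : stepA cs i (dp, ans) k
          = (dp.set i ((dp.getD i []).set k ((runR cs i (k - i) : Nat) : Int)), gMax cs ans (k - i, i)) := by
        show (if pvMatch cs i k then _ else _) = _
        rw [if_pos hm]
        refine Prod.ext ?_ ?_
        · show dp.set i ((dp.getD i []).set k _) = _
          rw [hv]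
        · show (if _ ≥ (k : Int) - (i : Int) then max ans (((k : Int) - (i : Int)) * 2) else ans) = _
          rw [hv, hcast]
          unfold gMax
          simp only [ge_iff_le, Nat.cast_le, mul_comm]
      rw [hstep]
      have hinv' : InvA cs cs.length i (k + 1)
          (dp.set i ((dp.getD i []).set k ((runR cs i (k - i) : Nat) : Int))) := by
        refine ⟨by rw [List.length_set]; exact h1, ?_, ?_⟩
        · intro row hrow
          rcases List.mem_or_eq_of_mem_set hrow with hmem | rfl
          · exact h2 _ hmem
          · rw [List.length_set]; exact hrlen
        · intro a b
          rw [getD_set_outer dp i a _ (h1 ▸ hi)]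
          by_cases ha : a = i
          · subst ha
            rw [if_pos rfl, getD_set_inner _ k b _ (hrlen ▸ hkn)]
            by_cases hb : b = k
            · subst hb
              rw [if_pos rfl, if_pos ⟨hik, hkn, Or.inr ⟨rfl, by omega⟩⟩]
            · rw [if_neg hb, h3 a b]
              exact if_congr (by omega) rfl rfl
          · rw [if_neg ha, h3 a b]
            exact if_congr (by omega) rfl rfl
      exact ih (k + 1) _ _ (by omega) (by omega) hinv'
    · -- no match: nothing changes; runR cs i (k-i) = 0 so gMax keeps ans
      have hm' : pvMatch cs i k = false := by
        cases h : pvMatch cs i k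
        · rfl
        · exact absurd h hm
      have hstep : stepA cs i (dp, ans) k = (dp, ans) := by
        show (if pvMatch cs i k then _ else _) = _
        rw [if_neg (by simp [hm'])]
      have hrz : runR cs i (k - i) = 0 := by
        apply runR_zero
        rwa [show i + (k - i) = k from by omega]
      have hg : gMax cs ans (k - i, i) = ans := by
        unfold gMax
        rw [if_neg (by simp only []; omega)]
      rw [hstep, hg]
      apply ih (k + 1) dp ans (by omega) (by omega)
      refine ⟨h1, h2, fun a b => ?_⟩
      rw [h3 a b]
      by_cases hab : a = i ∧ b = k
      · obtain ⟨rfl, rfl⟩ := hab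
        rw [if_neg (by omega), if_pos ⟨hik, hkn, Or.inr ⟨rfl, by omega⟩⟩, hrz]
        rfl
      · exact if_congr (by omega) rfl rfl

theorem InvA_shift (cs : List Char) (k : Nat) (dp : List (List Int))
    (h : InvA cs cs.length k cs.length dp) : InvA cs cs.length (k + 1) (k + 2) dp := by
  obtain ⟨h1, h2, h3⟩ := h
  exact ⟨h1, h2, fun a b => by rw [h3 a b]; exact if_congr (by omega) rfl rfl⟩

theorem outerA_spec (cs : List Char) :
    ∀ (t k : Nat) (dp : List (List Int)) (ans : Int), t = cs.length - k →
    InvA cs cs.length k (k + 1) dp →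
    ((List.range' k t).foldl
        (fun st i => (List.range' (i + 1) (cs.length - (i + 1))).foldl (stepA cs i) st) (dp, ans)).2 =
      List.foldl (gMax cs) ans
        ((List.range' k t).flatMap (fun i => (List.range' (i + 1) (cs.length - (i + 1))).map (fun j => (j - i, i)))) := by
  intro t
  induction t with
  | zero => intros; rfl
  | succ t ih =>
    intro k dp ans ht hinv
    have hkn : k < cs.length := by omega
    rw [List.range'_succ]
    simp only [List.foldl_cons, List.flatMap_cons, List.foldl_append]
    have h := innerA_spec cs k hkn (cs.length - (k + 1)) (k + 1) dp ans (by omega) rfl hinv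
    rw [← h.2]
    exact ih (k + 1) _ _ (by omega) (InvA_shift cs k _ h.1)

theorem InvA_init (cs : List Char) :
    InvA cs cs.length 0 1 (List.replicate cs.length (List.replicate cs.length 0)) := by
  refine ⟨List.length_replicate .., fun row hr => ?_, fun a b => ?_⟩
  · rw [List.eq_of_mem_replicate hr]
    exact List.length_replicate ..
  · rw [if_neg (by omega)]
    simp only [List.getD_eq_getElem?_getD, List.getElem?_replicate]
    split_ifs <;> simp

theorem solve_eq_rowPairs (s : String) :
    solve s = List.foldl (gMax s.toList) 0 (rowPairs s.toList.length) := by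
  simp only [solve, rowPairs]
  rw [List.range_eq_range']
  exact outerA_spec s.toList s.toList.length 0 _ 0 (by omega) (InvA_init s.toList)

theorem runR_succ_prev (cs : List Char) (d k : Nat) (prev : Nat)
    (hk : prev = (match k with | 0 => 0 | k' + 1 => runR cs k' d)) :
    (if pvMatch cs k (k + d) then prev + 1 else 0) = runR cs k d := by
  cases k with
  | zero => subst hk; simp [runR]
  | succ k' => subst hk; simp [runR]

theorem innerB_spec (cs : List Char) (d : Nat) :
    ∀ (t k : Nat) (ans : Int),
    ((List.range' k t).foldl (stepB cs d)
        ((match k with | 0 => 0 | k' + 1 => runR cs k' d), ans)).2 =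
      List.foldl (gMax cs) ans ((List.range' k t).map (fun i => (d, i))) := by
  intro t
  induction t with
  | zero => intro k ans; rfl
  | succ t ih =>
    intro k ans
    rw [List.range'_succ]
    simp only [List.foldl_cons, List.map_cons]
    have hstep : stepB cs d ((match k with | 0 => 0 | k' + 1 => runR cs k' d), ans) k
        = ((match k + 1 with | 0 => 0 | k' + 1 => runR cs k' d), gMax cs ans (d, k)) := by
      show ((if pvMatch cs k (k + d) then _ + 1 else 0), _) = _
      rw [runR_succ_prev cs d k _ rfl]
      unfold gMax
      simp only [ge_iff_le]
    rw [hstep]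
    exact ih (k + 1) (gMax cs ans (d, k))

theorem innerB0 (cs : List Char) (d : Nat) (t : Nat) (ans : Int) :
    ((List.range t).foldl (stepB cs d) (0, ans)).2 =
      List.foldl (gMax cs) ans ((List.range t).map (fun i => (d, i))) := by
  rw [List.range_eq_range']
  exact innerB_spec cs d t 0 ans

theorem outerB_spec (cs : List Char) :
    ∀ (t k : Nat) (ans : Int), 1 ≤ k →
    (List.range' k t).foldl (fun ans d => ((List.range (cs.length - d)).foldl (stepB cs d) (0, ans)).2) ans =
      List.foldl (gMax cs) ans
        ((List.range' k t).flatMap (fun d => (List.range (cs.length - d)).map (fun i => (d, i)))) := by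
  intro t
  induction t with
  | zero => intros; rfl
  | succ t ih =>
    intro k ans hk
    rw [List.range'_succ]
    simp only [List.foldl_cons, List.flatMap_cons, List.foldl_append]
    rw [innerB0 cs k (cs.length - k) ans]
    exact ih (k + 1) _ (by omega)

theorem solve_alt_eq_diagPairs (s : String) :
    solve_alt s = List.foldl (gMax s.toList) 0 (diagPairs s.toList.length) := by
  show (List.range' 1 (s.toList.length - 1)).foldl _ 0 = _
  rw [outerB_spec s.toList (s.toList.length - 1) 1 0 (by omega)]
  rfl

theorem mem_rowPairs (n : Nat) (p : Nat × Nat) :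
    p ∈ rowPairs n ↔ 1 ≤ p.1 ∧ p.2 + p.1 < n := by
  obtain ⟨d, a⟩ := p
  simp only [rowPairs, List.mem_flatMap, List.mem_map, List.mem_range, List.mem_range'_1]
  constructor
  · rintro ⟨i, hi, j, hj, heq⟩
    injection heq with h1 h2
    subst h1; subst h2
    omega
  · rintro ⟨h1, h2⟩
    refine ⟨a, by omega, a + d, by omega, ?_⟩
    simp only [Prod.mk.injEq]
    exact ⟨by omega, trivial⟩

theorem mem_diagPairs (n : Nat) (p : Nat × Nat) :
    p ∈ diagPairs n ↔ 1 ≤ p.1 ∧ p.2 + p.1 < n := by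
  obtain ⟨d, a⟩ := p
  simp only [diagPairs, List.mem_flatMap, List.mem_map, List.mem_range, List.mem_range'_1]
  constructor
  · rintro ⟨e, he, i, hi, heq⟩
    injection heq with h1 h2
    subst h1; subst h2
    omega
  · rintro ⟨h1, h2⟩
    exact ⟨d, by omega, a, by omega, rfl⟩

theorem nodup_rowPairs (n : Nat) : (rowPairs n).Nodup := by
  rw [rowPairs, List.nodup_flatMap]
  constructor
  · intro i _
    refine List.Nodup.map_on ?_ (List.nodup_range' ..)
    intro j hj j' hj' heq
    injection heq with h1 h2
    rw [List.mem_range'_1] at hj hj'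
    omega
  · refine List.Pairwise.imp ?_ (List.pairwise_lt_range)
    intro i i' hlt p hp hp'
    simp only [List.mem_map] at hp hp'
    obtain ⟨j, _, rfl⟩ := hp
    obtain ⟨j', _, heq⟩ := hp'
    injection heq with h1 h2
    omega

theorem nodup_diagPairs (n : Nat) : (diagPairs n).Nodup := by
  rw [diagPairs, List.nodup_flatMap]
  constructor
  · intro d _
    refine List.Nodup.map_on ?_ (List.nodup_range)
    intro i _ i' _ heq
    exact congrArg Prod.snd heq
  · refine List.Pairwise.imp ?_ (List.pairwise_lt_range')
    intro d d' hlt p hp hp'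
    simp only [List.mem_map] at hp hp'
    obtain ⟨i, _, rfl⟩ := hp
    obtain ⟨i', _, heq⟩ := hp'
    injection heq with h1 h2
    omega

theorem perm_pairs (n : Nat) : List.Perm (rowPairs n) (diagPairs n) := by
  exact (List.perm_ext_iff_of_nodup (nodup_rowPairs n) (nodup_diagPairs n)).mpr
    (fun p => (mem_rowPairs n p).trans (mem_diagPairs n p).symm)

-- ===== VERDICT (by name: the statement is the Claim_ definition above) =====
theorem solve_spec : Claim_equal_solve := by
  intro s _
  unfold Spec_solve
  rw [solve_eq_rowPairs, solve_alt_eq_diagPairs]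
  exact (perm_pairs s.toList.length).foldl_eq' (f := gMax s.toList) (fun x _ y _ z => by
    unfold gMax; split_ifs <;> omega) 0
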